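-- pv_equiv track=rewrite | github.com/Caasitroplla/IntelligentDataAnalysisRevision | PointClouds/misc/pca.py | create_document_term_matrix
-- ===== SOURCE A (Python) =====
-- def create_document_term_matrix(documents):
--     # Pre process all words in the documents to save time
--     processed = []
--     for i, doc in enumerate(documents):
--         words = doc.split()
--         words = [word.lower() for word in words]
--         words = [word.strip(".,()!?") for word in words]
--         words = [word for word in words if word]
--         processed.append(words)
--
--     # Get a list of unique words
--     unique_words = set()
--     for words in processed:
--         unique_words.update(words)
--
--     unique_words = list(unique_words) # This is our x-axis
--     unique_words.sort() # Sort the words to maintain consistency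
--
--     document_term_matrix = [[0 for _ in unique_words] for _ in documents]
--
--     # For each document have a frequency count of each word
--     for i, words in enumerate(processed):
--         for word in unique_words:
--             document_term_matrix[i][unique_words.index(word)] = words.count(word)
--
--     return document_term_matrix, unique_words
-- ===== SOURCE B (Python) =====
-- def _tokenize(doc):
--     out = []
--     for raw in doc.split():
--         w = raw.lower().strip(".,()!?")
--         if w:
--             out.append(w)
--     return out
--
-- def create_document_term_matrix(documents):
--     # Scatter strategy: tokenize once, build sorted vocab and a word->column dict,
--     # then each row starts as zeros and a single pass over the document's tokens
--     # increments the cell at that token's column (no .index/.count/counter-gather passes).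
--     token_lists = [_tokenize(doc) for doc in documents]
--     vocab = sorted({w for ws in token_lists for w in ws})
--     col = {w: j for j, w in enumerate(vocab)}
--     matrix = []
--     for ws in token_lists:
--         row = [0] * len(vocab)
--         for w in ws:
--             row[col[w]] += 1
--         matrix.append(row)
--     return matrix, vocab
-- ===== Notes on version B (the rewrite author's own statement) =====
-- stated objective: faster
-- what changed: Replaces A's gather strategy (prebuilt zero matrix filled by per-(doc,vocab-word) unique_words.index and words.count scans) with a scatter strategy: a word-to-column dict is built once from the sorted vocabulary and each row is produced by a single pass over the document's tokens incrementing the cell at that token's column.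
import Mathlib
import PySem

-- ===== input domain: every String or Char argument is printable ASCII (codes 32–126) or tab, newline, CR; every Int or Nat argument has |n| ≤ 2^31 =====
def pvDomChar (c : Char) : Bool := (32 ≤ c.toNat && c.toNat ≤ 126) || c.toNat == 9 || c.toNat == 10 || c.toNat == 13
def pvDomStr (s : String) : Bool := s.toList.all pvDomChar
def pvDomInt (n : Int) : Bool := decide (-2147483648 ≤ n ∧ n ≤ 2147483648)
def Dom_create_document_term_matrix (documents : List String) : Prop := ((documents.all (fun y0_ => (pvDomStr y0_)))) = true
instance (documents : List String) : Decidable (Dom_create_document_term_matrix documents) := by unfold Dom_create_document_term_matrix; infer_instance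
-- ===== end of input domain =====

-- B replaces A's gather passes (zero matrix filled via unique_words.index and words.count
-- per (document, vocabulary word)) with a scatter strategy: a word→column dict built once
-- over the sorted vocabulary, each row filled by one pass over the document's tokens
-- incrementing the token's column; measurably faster.

-- ===== PORT A =====
def create_document_term_matrix (documents : List String) : List (List Int) × List String :=
  let processed := documents.foldl (fun acc doc =>
      let words := PySem.Str.split₀ doc
      let words := words.map (fun w => PySem.Str.lower w)
      let words := words.map (fun w => PySem.Str.stripChars w ".,()!?")
      let words := words.filter (fun w => w ≠ "")
      acc ++ [words]) []
  let unique_set : PySem.Set String := processed.foldl (fun s ws => PySem.Set.update s ws) PySem.Set.empty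
  let unique_words := PySem.List.sorted unique_set (fun x => x)
  let mtx0 := documents.map (fun _ => unique_words.map (fun _ => (0 : Int)))
  let mtx := (PySem.List.enumerate processed).foldl (fun m iw =>
      unique_words.foldl (fun m w =>
        match PySem.List.index? unique_words w with
        | some j => PySem.List.pySetD m iw.1
            (PySem.List.pySetD (PySem.List.pyGetD m iw.1 []) ((j : Nat) : Int)
              ((PySem.List.count iw.2 w : Nat) : Int))
        | none => m  -- unreachable: w is drawn from unique_words, so .index never raises
        ) m) mtx0
  (mtx, unique_words)

-- ===== PORT B =====
-- _tokenize: loop over doc.split() appending the cleaned non-empty words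
def pvTokenize (doc : String) : List String :=
  (PySem.Str.split₀ doc).foldl (fun out raw =>
    let w := PySem.Str.stripChars (PySem.Str.lower raw) ".,()!?"
    if w ≠ "" then out ++ [w] else out) []

def create_document_term_matrix_alt (documents : List String) : List (List Int) × List String :=
  let token_lists := documents.map pvTokenize
  let vocab := PySem.List.sorted (PySem.Set.ofList token_lists.flatten) (fun x => x)
  let col : PySem.Dict String Int :=
    (PySem.List.enumerate vocab).foldl (fun d p => d.insert p.2 p.1) PySem.Dict.empty
  let matrix := token_lists.foldl (fun m ws =>
      let row := ws.foldl (fun row w =>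
          match col.get? w with
          | some j => PySem.List.pySetD row j (PySem.List.pyGetD row j 0 + 1)
          | none => row  -- unreachable: every token is in vocab (Python would KeyError)
          ) (List.replicate vocab.length (0 : Int))
      m ++ [row]) []
  (matrix, vocab)

-- ===== PRECONDITION & SPEC =====
def Spec_create_document_term_matrix (documents : List String) (out : List (List Int) × List String) : Prop := out = create_document_term_matrix_alt documents
instance (documents : List String) (out : List (List Int) × List String) : Decidable (Spec_create_document_term_matrix documents out) := by unfold Spec_create_document_term_matrix; infer_instance

-- ===== CLAIM (what is proved, stated in full; the proofs are below) =====
def Claim_equal_create_document_term_matrix : Prop := ∀ (documents : List String), Dom_create_document_term_matrix documents → Spec_create_document_term_matrix documents (create_document_term_matrix documents)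

-- ===== LEMMAS AND PROOFS =====

-- the cleaned word list of one document (split, lowercase, strip punctuation, drop empties)
def pvW (doc : String) : List String :=
  ((PySem.Str.split₀ doc).map
      (fun w => PySem.Str.stripChars (PySem.Str.lower w) ".,()!?")).filter (fun w => w ≠ "")

theorem pv_tok_aux (l : List String) :
    ∀ (acc : List String),
    l.foldl (fun out raw =>
        let w := PySem.Str.stripChars (PySem.Str.lower raw) ".,()!?"
        if w ≠ "" then out ++ [w] else out) acc
      = acc ++ (l.map (fun raw => PySem.Str.stripChars (PySem.Str.lower raw) ".,()!?")).filter
          (fun w => w ≠ "") := by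
  induction l with
  | nil => intro acc; simp
  | cons raw l' ih =>
    intro acc
    simp only [List.foldl_cons]
    rw [ih]
    by_cases h : PySem.Str.stripChars (PySem.Str.lower raw) ".,()!?" = "" <;> simp [h]

theorem pv_tokenize_eq (doc : String) : pvTokenize doc = pvW doc := by
  unfold pvTokenize pvW
  rw [pv_tok_aux]
  simp [List.filter_map, Function.comp_def]

theorem pv_procA (documents : List String) :
    documents.foldl (fun acc doc =>
      let words := PySem.Str.split₀ doc
      let words := words.map (fun w => PySem.Str.lower w)
      let words := words.map (fun w => PySem.Str.stripChars w ".,()!?")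
      let words := words.filter (fun w => w ≠ "")
      acc ++ [words]) [] = documents.map pvW := by
  have := PySem.List.foldl_append_singleton_eq_map (fun doc =>
    (((PySem.Str.split₀ doc).map (fun w => PySem.Str.lower w)).map
        (fun w => PySem.Str.stripChars w ".,()!?")).filter (fun w => w ≠ "")) documents []
  simp only [this, List.nil_append]
  refine List.map_congr_left fun d _ => ?_
  simp [pvW, List.map_map, Function.comp_def]

theorem pv_setA (l : List (List String)) :
    l.foldl (fun s ws => PySem.Set.update s ws) PySem.Set.empty
      = PySem.Set.ofList l.flatten := by
  simp [PySem.Set.update, PySem.Set.ofList, List.foldl_flatten]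

theorem pv_take_set_succ {α : Type} (r : List α) (k : Nat) (v : α) (h : k < r.length) :
    (r.set k v).take (k + 1) = r.take k ++ [v] := by
  induction r generalizing k with
  | nil => simp at h
  | cons a t ih =>
    cases k with
    | zero => simp
    | succ k => simp [List.set_cons_succ, List.take_succ_cons, ih k (by simpa using h)]

-- writes through row n only: lift the inner fold to the row
theorem pv_loc (vocab : List String) (c : String → Int) (l : List String) :
    ∀ (m : List (List Int)) (n : Nat), n < m.length →
    l.foldl (fun m w =>
        match PySem.List.index? vocab w with
        | some j => PySem.List.pySetD m ((n : Nat) : Int)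
            (PySem.List.pySetD (PySem.List.pyGetD m ((n : Nat) : Int) []) ((j : Nat) : Int) (c w))
        | none => m) m
      = PySem.List.pySetD m ((n : Nat) : Int)
          (l.foldl (fun r w =>
            match PySem.List.index? vocab w with
            | some j => PySem.List.pySetD r ((j : Nat) : Int) (c w)
            | none => r) (PySem.List.pyGetD m ((n : Nat) : Int) [])) := by
  induction l with
  | nil =>
    intro m n hn
    simp only [List.foldl_nil, PySem.List.pySetD_natCast, PySem.List.pyGetD_natCast,
      List.getD_eq_getElem?_getD, List.getElem?_eq_getElem hn, Option.getD_some]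
    exact (List.set_getElem_self hn).symm
  | cons w l' ih =>
    intro m n hn
    simp only [List.foldl_cons]
    cases hidx : PySem.List.index? vocab w with
    | none => rw [ih m n hn]
    | some j =>
      rw [ih _ n (by simp [PySem.List.pySetD_natCast, hn])]
      simp only [PySem.List.pySetD_natCast, PySem.List.pyGetD_natCast]
      simp [List.set_set, List.getD_eq_getElem?_getD, hn]

-- the inner fold over the whole vocabulary fills the row with the counts, position by position
theorem pv_fill (vocab : List String) (c : String → Int) :
    ∀ (suf pre : List String) (r : List Int), vocab = pre ++ suf → vocab.Nodup →
      r.length = vocab.length →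
    suf.foldl (fun r w =>
        match PySem.List.index? vocab w with
        | some j => PySem.List.pySetD r ((j : Nat) : Int) (c w)
        | none => r) r
      = r.take pre.length ++ suf.map c := by
  intro suf
  induction suf with
  | nil =>
    intro pre r hsplit hnd hlen
    simp [List.take_of_length_le, hlen, hsplit]
  | cons w suf' ih =>
    intro pre r hsplit hnd hlen
    have hwpre : w ∉ pre := by
      have h2 := hnd
      rw [hsplit] at h2
      simp only [List.nodup_append] at h2
      intro hw
      exact (h2.2.2 w hw w (by simp)) rfl
    have hidx : PySem.List.index? vocab w = some pre.length :=
      (PySem.List.index?_eq_some_iff vocab w pre.length).mpr ⟨pre, suf', hsplit, rfl, hwpre⟩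
    have hprelt : pre.length < r.length := by
      rw [hlen, hsplit]; simp
    simp only [List.foldl_cons, hidx]
    rw [PySem.List.pySetD_natCast r pre.length (c w)]
    rw [ih (pre ++ [w]) (r.set pre.length (c w)) (by simp [hsplit]) hnd (by simp [hlen])]
    have hl1 : (pre ++ [w]).length = pre.length + 1 := by simp
    rw [hl1, pv_take_set_succ r pre.length (c w) hprelt]
    simp

theorem pv_enumerate_cons {α : Type} (x : α) (xs : List α) (s : Int) :
    PySem.List.enumerate (x :: xs) s = (s, x) :: PySem.List.enumerate xs (s + 1) := rfl

-- the outer loop rewrites each row of the matrix to the count row of its document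
theorem pv_outerA (vocab : List String) (hnd : vocab.Nodup) :
    ∀ (l : List (List String)) (n : Nat) (m : List (List Int)),
      m.length = n + l.length → (∀ r ∈ m, r.length = vocab.length) →
    (PySem.List.enumerate l ((n : Nat) : Int)).foldl (fun m iw =>
        vocab.foldl (fun m w =>
          match PySem.List.index? vocab w with
          | some j => PySem.List.pySetD m iw.1
              (PySem.List.pySetD (PySem.List.pyGetD m iw.1 []) ((j : Nat) : Int)
                ((PySem.List.count iw.2 w : Nat) : Int))
          | none => m) m) m
      = m.take n ++ l.map (fun ws => vocab.map (fun w => ((PySem.List.count ws w : Nat) : Int))) := by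
  intro l
  induction l with
  | nil =>
    intro n m hlen _
    have hle : m.length ≤ n := by simp at hlen; omega
    simp [PySem.List.enumerate, List.take_of_length_le hle]
  | cons ws l' ih =>
    intro n m hlen hrows
    have hn : n < m.length := by rw [hlen]; simp
    rw [pv_enumerate_cons]
    simp only [List.foldl_cons]
    have hrow : PySem.List.pyGetD m ((n : Nat) : Int) [] = m[n] := by
      rw [PySem.List.pyGetD_natCast, List.getD_eq_getElem?_getD, List.getElem?_eq_getElem hn]
      rfl
    have hrowlen : (PySem.List.pyGetD m ((n : Nat) : Int) []).length = vocab.length := by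
      rw [hrow]; exact hrows _ (List.getElem_mem hn)
    rw [pv_loc vocab (fun w => ((PySem.List.count ws w : Nat) : Int)) vocab m n hn,
        pv_fill vocab _ vocab [] _ rfl hnd hrowlen]
    simp only [List.length_nil, List.take_zero, List.nil_append]
    rw [PySem.List.pySetD_natCast m n]
    have hcast : ((n : Nat) : Int) + 1 = (((n + 1 : Nat)) : Int) := by push_cast; ring
    rw [hcast]
    rw [ih (n + 1)
        (m.set n ((vocab.map (fun w => ((PySem.List.count ws w : Nat) : Int)))))
        (by simp only [List.length_set]; simp only [List.length_cons] at hlen; omega)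
        (fun r hr => by
          rcases List.mem_or_eq_of_mem_set hr with h | h
          · exact hrows r h
          · simp [h])]
    rw [pv_take_set_succ m n _ hn]
    simp

theorem pv_outerA0 (vocab : List String) (hnd : vocab.Nodup)
    (l : List (List String)) (m : List (List Int))
    (hlen : m.length = l.length) (hrows : ∀ r ∈ m, r.length = vocab.length) :
    (PySem.List.enumerate l 0).foldl (fun m iw =>
        vocab.foldl (fun m w =>
          match PySem.List.index? vocab w with
          | some j => PySem.List.pySetD m iw.1
              (PySem.List.pySetD (PySem.List.pyGetD m iw.1 []) ((j : Nat) : Int)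
                ((PySem.List.count iw.2 w : Nat) : Int))
          | none => m) m) m
      = l.map (fun ws => vocab.map (fun w => ((PySem.List.count ws w : Nat) : Int))) := by
  have h := pv_outerA vocab hnd l 0 m (by simpa using hlen) hrows
  simpa using h

-- B's word→column dict looks up the position in vocab
theorem pv_col_get (vocab : List String) (hnd : vocab.Nodup) (w : String) (j : Nat)
    (hj : PySem.List.index? vocab w = some j) :
    ((PySem.List.enumerate vocab).foldl (fun d p => d.insert p.2 p.1)
        (PySem.Dict.empty : PySem.Dict String Int)).get? w = some ((j : Nat) : Int) := by
  have hitems : ((PySem.List.enumerate vocab).foldl (fun d p => d.insert p.2 p.1)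
        (PySem.Dict.empty : PySem.Dict String Int)).items
      = (PySem.List.enumerate vocab).map (fun p => (p.2, p.1)) := by
    have := PySem.Dict.items_foldl_insert_fresh (PySem.List.enumerate vocab 0)
      (fun p => p.2) (fun p => p.1) (PySem.Dict.empty : PySem.Dict String Int)
      (fun a _ => PySem.Dict.contains_empty a.2)
      (by rw [PySem.List.map_snd_enumerate]; exact hnd)
    simpa using this
  have hkeysnd : ((PySem.List.enumerate vocab).foldl (fun d p => d.insert p.2 p.1)
        (PySem.Dict.empty : PySem.Dict String Int)).keys.Nodup :=
    PySem.Dict.nodup_keys_foldl_insert_key (PySem.List.enumerate vocab 0)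
      (fun p => p.2) (fun _ p => p.1) _ PySem.Dict.nodup_keys_empty
  obtain ⟨hjlt, hvj, _⟩ := PySem.List.getElem_of_index?_eq_some hj
  have hmem : (w, ((j : Nat) : Int)) ∈ ((PySem.List.enumerate vocab).foldl
      (fun d p => d.insert p.2 p.1) (PySem.Dict.empty : PySem.Dict String Int)).items := by
    rw [hitems]
    refine List.mem_map.mpr ⟨(((j : Nat) : Int), w), ?_, rfl⟩
    exact (PySem.List.mem_enumerate_iff _ _ _).mpr ⟨j, hjlt, by simp [hvj]⟩
  exact PySem.Dict.get?_of_mem_items _ hmem hkeysnd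

-- scatter: one pass incrementing the token's column turns vocab.map f into vocab.map (f + count)
theorem pv_scatter (vocab : List String) (hnd : vocab.Nodup) (ws : List String) :
    ∀ (f : String → Int), (∀ w ∈ ws, w ∈ vocab) →
    ws.foldl (fun row w =>
        match ((PySem.List.enumerate vocab).foldl (fun d p => d.insert p.2 p.1)
            (PySem.Dict.empty : PySem.Dict String Int)).get? w with
        | some j => PySem.List.pySetD row j (PySem.List.pyGetD row j 0 + 1)
        | none => row) (vocab.map f)
      = vocab.map (fun v => f v + (ws.count v : Int)) := by
  induction ws with
  | nil => intro f _; simp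
  | cons w ws' ih =>
    intro f hmem
    have hwv : w ∈ vocab := hmem w (by simp)
    obtain ⟨j, hj⟩ := Option.isSome_iff_exists.mp
      ((PySem.List.index?_isSome_iff vocab w).mpr hwv)
    obtain ⟨hjlt, hvj, _⟩ := PySem.List.getElem_of_index?_eq_some hj
    simp only [List.foldl_cons, pv_col_get vocab hnd w j hj]
    have hstep : PySem.List.pySetD (vocab.map f) ((j : Nat) : Int)
        (PySem.List.pyGetD (vocab.map f) ((j : Nat) : Int) 0 + 1)
        = vocab.map (fun v => if v = w then f v + 1 else f v) := by
      rw [PySem.List.pySetD_natCast, PySem.List.pyGetD_natCast]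
      have hget : (vocab.map f).getD j 0 = f w := by
        rw [List.getD_eq_getElem?_getD, List.getElem?_eq_getElem (by simpa using hjlt)]
        simp [hvj]
      rw [hget]
      apply List.ext_getElem (by simp)
      intro k hk1 hk2
      simp only [List.length_set, List.length_map] at hk1
      by_cases hkj : k = j
      · subst hkj
        simp [List.getElem_set_self, hvj]
      · have hne : vocab[k] ≠ w := by
          intro he
          exact hkj (hnd.getElem_inj_iff.mp (he.trans hvj.symm))
        have hjk : j ≠ k := fun h => hkj h.symm
        simp [hjk, hne]
    rw [hstep, ih (fun v => if v = w then f v + 1 else f v) (fun x hx => hmem x (by simp [hx]))]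
    refine List.map_congr_left fun v _ => ?_
    by_cases hvw : v = w
    · subst hvw
      simp
      ring
    · simp [hvw, Ne.symm hvw]

theorem pv_row (vocab : List String) (hnd : vocab.Nodup) (ws : List String)
    (hmem : ∀ w ∈ ws, w ∈ vocab) :
    ws.foldl (fun row w =>
        match ((PySem.List.enumerate vocab).foldl (fun d p => d.insert p.2 p.1)
            (PySem.Dict.empty : PySem.Dict String Int)).get? w with
        | some j => PySem.List.pySetD row j (PySem.List.pyGetD row j 0 + 1)
        | none => row) (List.replicate vocab.length (0 : Int))
      = vocab.map (fun v => (ws.count v : Int)) := by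
  have hinit : List.replicate vocab.length (0 : Int) = vocab.map (fun _ => (0 : Int)) := by
    simp
  rw [hinit, pv_scatter vocab hnd ws (fun _ => 0) hmem]
  simp

theorem create_document_term_matrix_spec_aux (documents : List String) :
    create_document_term_matrix documents = create_document_term_matrix_alt documents := by
  unfold create_document_term_matrix create_document_term_matrix_alt
  simp only [pv_procA, pv_setA]
  have htok : documents.map pvTokenize = documents.map pvW :=
    List.map_congr_left fun d _ => pv_tokenize_eq d
  rw [htok]
  set vocab := PySem.List.sorted (PySem.Set.ofList (documents.map pvW).flatten) (fun x => x)
    with hvocab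
  have hnd : vocab.Nodup :=
    (PySem.List.sorted_perm _ _ _).symm.nodup (PySem.Set.nodup_ofList _)
  simp only [Prod.mk.injEq]
  refine ⟨?_, trivial⟩
  rw [pv_outerA0 vocab hnd (documents.map pvW)
      (documents.map fun _ => vocab.map fun _ => (0 : Int)) (by simp)
      (fun r hr => by
        rcases List.mem_map.mp hr with ⟨d, _, rfl⟩
        simp)]
  rw [PySem.List.foldl_append_singleton_eq_map
      (fun ws => ws.foldl (fun row w =>
        match ((PySem.List.enumerate vocab).foldl (fun d p => d.insert p.2 p.1)
            (PySem.Dict.empty : PySem.Dict String Int)).get? w with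
        | some j => PySem.List.pySetD row j (PySem.List.pyGetD row j 0 + 1)
        | none => row) (List.replicate vocab.length (0 : Int))) (documents.map pvW) []]
  simp only [List.nil_append]
  refine List.map_congr_left fun ws hws => ?_
  have hmem : ∀ w ∈ ws, w ∈ vocab := by
    intro w hw
    rw [hvocab, PySem.List.mem_sorted, PySem.Set.mem_ofList]
    exact List.mem_flatten.mpr ⟨ws, hws, hw⟩
  rw [pv_row vocab hnd ws hmem]
  refine List.map_congr_left fun v _ => ?_
  simp [PySem.List.count_eq]

-- ===== VERDICT (by name: the statement is the Claim_ definition above) =====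
theorem create_document_term_matrix_spec : Claim_equal_create_document_term_matrix := by
  intro documents _
  exact create_document_term_matrix_spec_aux documents
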